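-- pv_equiv track=rewrite | github.com/harryyim707/BOJ | 22343.py | go
-- ===== SOURCE A (Python) =====
-- def go(s, ma):
--     v = list(0 for i in range(ma+1))
--     t = 0
--     for i in range(len(s)):
--         if(i+1 < len(s) and s[i] == '(' and s[i+1] == ')'):
--             v[t] += 1
--         elif (s[i] == '('):
--             t += 1
--         elif (s[i-1] != '('):
--             t -= 1
--     for i in range(ma):
--         v[i+1] += v[i]//2
--         v[i] %= 2
--     v.reverse()
--     return v
-- ===== SOURCE B (Python) =====
-- def go(s, ma):
--     n = len(s)
--     v = [0] * (ma + 1)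
--     t = 0
--     for i in range(n):
--         if i + 1 < n and s[i] == '(' and s[i + 1] == ')':
--             v[t] += 1
--         elif s[i] == '(':
--             t += 1
--         elif s[i - 1] != '(':
--             t -= 1
--     if not v:
--         return []
--     N = 0
--     for c in reversed(v):
--         N = 2 * N + c
--     bits = []
--     for _ in range(len(v) - 1):
--         N, b = divmod(N, 2)
--         bits.append(b)
--     bits.append(N)
--     bits.reverse()
--     return bits
-- ===== Notes on version B (the rewrite author's own statement) =====
-- stated objective: alternative
-- what changed: The in-place base-2 carry-propagation loop and final reverse are replaced by one closed-form step: compute N = sum(v[k]*2^k) once and read the answer off as the binary digits of N (top slot unmasked), emitted directly in reversed order.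
import Mathlib
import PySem

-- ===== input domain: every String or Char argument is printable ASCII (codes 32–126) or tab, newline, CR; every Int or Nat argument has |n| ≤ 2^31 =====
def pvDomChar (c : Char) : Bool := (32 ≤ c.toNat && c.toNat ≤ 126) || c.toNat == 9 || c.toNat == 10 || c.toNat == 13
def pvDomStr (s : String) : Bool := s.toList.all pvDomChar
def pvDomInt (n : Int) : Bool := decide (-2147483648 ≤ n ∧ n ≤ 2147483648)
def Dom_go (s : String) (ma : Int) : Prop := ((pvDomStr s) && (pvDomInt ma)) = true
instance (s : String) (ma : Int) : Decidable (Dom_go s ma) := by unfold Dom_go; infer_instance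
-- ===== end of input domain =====

-- B replaces A's in-place base-2 carry-propagation loop (and final reverse) by a closed-form
-- binary-digit extraction of N = sum(v[k]*2^k), emitted directly in reversed order; the first
-- parsing pass is textually identical in both programs (objective: alternative, not faster).

-- ===== PORT A =====
-- the first parsing pass, textually identical in Source A and Source B, shared by both ports
-- (Python raises IndexError in 'v[t] += 1' when t is outside [-(ma+1), ma] — those inputs are
-- excluded by Pre_go; in range, pySetD/pyGetD are exact, including negative-index wraparound,
-- and s[i-1] at i = 0 is Python's s[-1], rendered by pyGetD cs (i-1))
def pvStep (cs : List Char) (st : List Int × Int) (i : Int) : List Int × Int :=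
  let v := st.1
  let t := st.2
  if (i + 1 < (cs.length : Int) ∧ PySem.List.pyGetD cs i ' ' = '(' ∧ PySem.List.pyGetD cs (i+1) ' ' = ')') then
    (PySem.List.pySetD v t (PySem.List.pyGetD v t 0 + 1), t)
  else if PySem.List.pyGetD cs i ' ' = '(' then (v, t + 1)
  else if PySem.List.pyGetD cs (i-1) ' ' ≠ '(' then (v, t - 1)
  else (v, t)

def pvParse (s : String) (ma : Int) : List Int × Int :=
  let cs := s.toList
  let v0 : List Int := (PySem.List.pyRange 0 (ma+1) 1).map (fun _ => 0)
  (PySem.List.pyRange 0 ((cs.length : Int)) 1).foldl (pvStep cs) (v0, 0)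

-- one iteration of A's carry loop: v[i+1] += v[i]//2; v[i] %= 2  (indices i, i+1 are in range)
def pvCarry (v : List Int) (i : Int) : List Int :=
  let v' := PySem.List.pySetD v (i+1)
    (PySem.List.pyGetD v (i+1) 0 + PySem.Int.floordiv (PySem.List.pyGetD v i 0) 2)
  PySem.List.pySetD v' i (PySem.Int.mod (PySem.List.pyGetD v' i 0) 2)

def go (s : String) (ma : Int) : List Int :=
  let v := (pvParse s ma).1
  ((PySem.List.pyRange 0 ma 1).foldl pvCarry v).reverse

-- ===== PORT B =====
def go_alt (s : String) (ma : Int) : List Int :=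
  let v := (pvParse s ma).1
  if v = [] then []
  else
    let N : Int := v.reverse.foldl (fun N c => 2 * N + c) 0
    let st := (List.range (v.length - 1)).foldl
      (fun st _ => (PySem.Int.floordiv st.1 2, st.2 ++ [PySem.Int.mod st.1 2]))
      (N, ([] : List Int))
    (st.2 ++ [st.1]).reverse

-- ===== PRECONDITION & SPEC =====
-- Python A raises IndexError exactly when some "()" pair is met while the running depth t lies
-- outside the index range [-(ma+1), ma] of v (Source B's identical first pass raises there too);
-- Pre_go states this in closed form: at every pair position, the prefix-counted depth is in range.
def pvPairAt (cs : List Char) (j : Nat) : Bool :=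
  decide (j + 1 < cs.length) && (cs.getD j ' ' == '(') && (cs.getD (j+1) ' ' == ')')
def pvIncAt (cs : List Char) (j : Nat) : Bool :=
  !pvPairAt cs j && (cs.getD j ' ' == '(')
def pvDecAt (cs : List Char) (j : Nat) : Bool :=
  !pvPairAt cs j && !(cs.getD j ' ' == '(') && !(PySem.List.pyGetD cs ((j : Int) - 1) ' ' == '(')
def pvT (cs : List Char) (i : Nat) : Int :=
  ((List.range i).countP (pvIncAt cs) : Int) - ((List.range i).countP (pvDecAt cs) : Int)

def Pre_go (s : String) (ma : Int) : Prop :=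
  ∀ j < s.toList.length, pvPairAt s.toList j = true →
    -(ma+1) ≤ pvT s.toList j ∧ pvT s.toList j ≤ ma
instance (s : String) (ma : Int) : Decidable (Pre_go s ma) := by unfold Pre_go; infer_instance

def pvWitness_go : String × Int := ("(())", 2)

def Spec_go (s : String) (ma : Int) (out : List Int) : Prop := out = go_alt s ma
instance (s : String) (ma : Int) (out : List Int) : Decidable (Spec_go s ma out) := by unfold Spec_go; infer_instance

-- ===== CLAIM (what is proved, stated in full; the proofs are below) =====
def Claim_equal_go : Prop := ∀ (s : String) (ma : Int), Dom_go s ma → Pre_go s ma → Spec_go s ma (go s ma)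

-- ===== LEMMAS AND PROOFS =====

-- N = sum of v[k]*2^k, the value B accumulates by Horner's rule
def pvN (v : List Int) : Int := (v.zipIdx.map (fun p => p.1 * 2 ^ p.2)).sum
-- bit j of N in Python semantics: N // 2**j % 2
def pvBit (N : Int) (j : Nat) : Int := PySem.Int.mod (PySem.Int.floordiv N (2 ^ j)) 2

theorem pvN_shift (ys : List Int) (k : Nat) :
    ((ys.zipIdx k).map (fun p => p.1 * 2 ^ p.2)).sum = 2 ^ k * pvN ys := by
  induction ys generalizing k with
  | nil => simp [pvN]
  | cons y t ih =>
    have h1 := ih (k+1)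
    have h0 := ih 1
    simp only [List.zipIdx_cons, List.map_cons, List.sum_cons, pvN] at h1 h0 ⊢
    rw [h1, h0]
    ring

theorem pvN_append (xs ys : List Int) : pvN (xs ++ ys) = pvN xs + 2 ^ xs.length * pvN ys := by
  simp only [pvN, List.zipIdx_append, List.map_append, List.sum_append, Nat.zero_add]
  rw [pvN_shift ys xs.length]
  rfl


-- B's Horner accumulation over the reversed list computes pvN
theorem horner_eq (v : List Int) (a : Int) :
    v.reverse.foldl (fun N c => 2 * N + c) a = 2 ^ v.length * a + pvN v := by
  induction v generalizing a with
  | nil => simp [pvN]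
  | cons x t ih =>
    have hx : pvN (x :: t) = x + 2 * pvN t := by
      have := pvN_shift t 1
      simp only [pvN, List.zipIdx_cons, List.map_cons, List.sum_cons] at this ⊢
      rw [this]
      ring
    rw [List.reverse_cons, List.foldl_append, ih a, List.foldl_cons, List.foldl_nil, hx]
    simp only [List.length_cons, pow_succ]
    ring

-- one carry iteration on a list of shape bits ++ C :: x :: rest, at index = bits.length
theorem carry_step (bits : List Int) (C x : Int) (rest : List Int) :
    pvCarry (bits ++ C :: x :: rest) (bits.length : Int) =
      bits ++ PySem.Int.mod C 2 :: (x + PySem.Int.floordiv C 2) :: rest := by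
  simp only [pvCarry]
  have e1 : ((bits.length : Int) + 1) = ((bits.length + 1 : Nat) : Int) := by push_cast; ring
  simp only [e1, PySem.List.pySetD_natCast, PySem.List.pyGetD_natCast]
  have g1 : (bits ++ C :: x :: rest).getD bits.length 0 = C := by
    simp [List.getD_eq_getElem?_getD]
  have g2 : (bits ++ C :: x :: rest).getD (bits.length + 1) 0 = x := by
    simp [List.getD_eq_getElem?_getD]
  have s1 : (bits ++ C :: x :: rest).set (bits.length + 1) (x + PySem.Int.floordiv C 2)
      = bits ++ C :: (x + PySem.Int.floordiv C 2) :: rest := by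
    rw [List.set_append_right _ _ (by omega)]
    simp
  rw [g1, g2, s1]
  have g3 : (bits ++ C :: (x + PySem.Int.floordiv C 2) :: rest).getD bits.length 0 = C := by
    simp [List.getD_eq_getElem?_getD]
  rw [g3, List.set_append_right _ _ (by omega)]
  simp

-- adding a multiple of 2^(n+1) does not change bit n
theorem bitA (A R : Int) (n : Nat) :
    PySem.Int.mod (PySem.Int.floordiv (A + 2^(n+1)*R) (2^n)) 2 = PySem.Int.mod (PySem.Int.floordiv A (2^n)) 2 := by
  rw [PySem.Int.floordiv_eq_ediv_of_pos (by positivity), PySem.Int.floordiv_eq_ediv_of_pos (by positivity),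
      PySem.Int.mod_eq_emod_of_pos (by norm_num), PySem.Int.mod_eq_emod_of_pos (by norm_num)]
  have h : A + 2^(n+1)*R = A + (2*R) * 2^n := by ring
  rw [h, Int.add_mul_ediv_right A (2*R) (by positivity)]
  exact Int.add_mul_emod_self_left _ _ _

-- halving the running carry is one more floor division by 2
theorem divB (A x : Int) (n : Nat) :
    x + PySem.Int.floordiv (PySem.Int.floordiv A (2^n)) 2 = PySem.Int.floordiv (A + 2^(n+1)*x) (2^(n+1)) := by
  rw [PySem.Int.floordiv_eq_ediv_of_pos (show (0:Int) < 2^n by positivity),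
      PySem.Int.floordiv_eq_ediv_of_pos (show (0:Int) < 2 by norm_num),
      PySem.Int.floordiv_eq_ediv_of_pos (show (0:Int) < 2^(n+1) by positivity)]
  rw [Int.ediv_ediv_of_nonneg (show (0:Int) ≤ 2^n by positivity)]
  have hp : (2:Int)^n * 2 = 2^(n+1) := by ring
  rw [hp]
  have h1 : A + 2^(n+1)*x = A + x * (2^(n+1)) := by ring
  rw [h1, Int.add_mul_ediv_right A x (by positivity)]
  ring


-- B's peeling loop: n halvings emit the n low bits of N and keep the quotient
theorem peel_eq (N : Int) (acc : List Int) (n : Nat) :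
    (List.range n).foldl
        (fun st (_ : Nat) => (PySem.Int.floordiv st.1 2, st.2 ++ [PySem.Int.mod st.1 2]))
        (N, acc)
      = (PySem.Int.floordiv N (2 ^ n), acc ++ (List.range n).map (pvBit N)) := by
  induction n with
  | zero =>
    simp
  | succ n ih =>
    rw [List.range_succ, List.foldl_append, ih, List.foldl_cons, List.foldl_nil]
    have hdiv : PySem.Int.floordiv (PySem.Int.floordiv N (2^n)) 2 = PySem.Int.floordiv N (2^(n+1)) := by
      have := divB N 0 n
      simpa using this
    simp [pvBit]
    rw [Int.ediv_ediv_of_nonneg (show (0:Int) ≤ 2^n by positivity), ← pow_succ]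

-- the carry loop invariant: after n iterations the first n slots are bits of N,
-- slot n is the running carry N_take(n+1) // 2^n, and the tail is untouched
theorem carry_inv (v : List Int) (m : Nat) (hv : v.length = m + 1) :
    ∀ n, n ≤ m →
    (PySem.List.pyRange 0 (n : Int) 1).foldl pvCarry v
    = (List.range n).map (pvBit (pvN v))
      ++ PySem.Int.floordiv (pvN (v.take (n+1))) (2^n) :: v.drop (n+1) := by
  intro n
  induction n with
  | zero =>
    intro _
    rw [PySem.List.pyRange_one_eq_nil (by norm_num)]
    match v, hv with
    | a :: t, _ =>
      simp [pvN]
  | succ n ih =>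
    intro hn
    have hn' : n ≤ m := by omega
    have hcast : (((n+1 : Nat)) : Int) = (n : Int) + 1 := by push_cast; ring
    rw [hcast, PySem.List.pyRange_one_succ_right (by positivity), List.foldl_append, ih hn']
    have hlt : n + 1 < v.length := by omega
    have hdrop : v.drop (n+1) = v[n+1] :: v.drop (n+2) := List.drop_eq_getElem_cons hlt
    rw [hdrop]
    set bits := (List.range n).map (pvBit (pvN v)) with hbits
    have hblen : bits.length = n := by simp [hbits]
    set C := PySem.Int.floordiv (pvN (v.take (n+1))) (2^n) with hC
    have hfold : List.foldl pvCarry (bits ++ C :: v[n+1] :: v.drop (n+2)) [(n:Int)]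
        = pvCarry (bits ++ C :: v[n+1] :: v.drop (n+2)) (n:Int) := rfl
    rw [hfold]
    have hstep := carry_step bits C v[n+1] (v.drop (n+2))
    rw [hblen] at hstep
    rw [hstep]
    have htake : v.take (n+2) = v.take (n+1) ++ [v[n+1]] :=
      List.take_succ_eq_append_getElem hlt
    have hNT : pvN (v.take (n+2)) = pvN (v.take (n+1)) + 2^(n+1) * v[n+1] := by
      rw [htake, pvN_append]
      simp [pvN, List.length_take, Nat.min_eq_left (by omega : n+1 ≤ v.length)]
    have hNv : pvN v = pvN (v.take (n+1)) + 2^(n+1) * pvN (v.drop (n+1)) := by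
      conv_lhs => rw [← List.take_append_drop (n+1) v]
      rw [pvN_append, List.length_take, Nat.min_eq_left (by omega : n+1 ≤ v.length)]
    have e1 : PySem.Int.mod C 2 = pvBit (pvN v) n := by
      rw [hC, pvBit, hNv, bitA]
    have e2 : v[n+1] + PySem.Int.floordiv C 2 = PySem.Int.floordiv (pvN (v.take (n+2))) (2^(n+1)) := by
      rw [hC, hNT, ← divB]
    rw [e1, e2, List.range_succ, List.map_append]
    simp
    exact hbits

theorem pvStep_len (cs : List Char) (st : List Int × Int) (i : Int) :
    ((pvStep cs st i).1).length = st.1.length := by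
  unfold pvStep
  split_ifs <;> simp [PySem.List.length_pySetD]

theorem foldl_pvStep_len (cs : List Char) (l : List Int) (st : List Int × Int) :
    ((l.foldl (pvStep cs) st).1).length = st.1.length := by
  induction l generalizing st with
  | nil => rfl
  | cons a t ih => rw [List.foldl_cons, ih, pvStep_len]

theorem pvParse_length (s : String) (ma : Int) :
    ((pvParse s ma).1).length = (ma + 1).toNat := by
  unfold pvParse
  rw [foldl_pvStep_len]
  simp [PySem.List.length_pyRange_one]

theorem main_eq (s : String) (ma : Int) : go s ma = go_alt s ma := by
  have hlen := pvParse_length s ma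
  by_cases hma : 0 ≤ ma
  · set v := (pvParse s ma).1 with hvdef
    set m : Nat := ma.toNat with hmdef
    have hmi : ma = (m : Int) := by omega
    have hv : v.length = m + 1 := by omega
    have hvne : v ≠ [] := by intro h; rw [h] at hv; simp at hv
    have hinv := carry_inv v m hv m (le_refl m)
    have htake : v.take (m+1) = v := List.take_of_length_le (by omega)
    have hdrop : v.drop (m+1) = [] := List.drop_of_length_le (by omega)
    rw [htake, hdrop] at hinv
    set N := pvN v with hN
    have hA : go s ma =
        ((List.range m).map (pvBit N) ++ [PySem.Int.floordiv N (2^m)]).reverse := by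
      show ((PySem.List.pyRange 0 ma 1).foldl pvCarry v).reverse = _
      rw [hmi, hinv]
    have hB : go_alt s ma =
        ((List.range m).map (pvBit N) ++ [PySem.Int.floordiv N (2^m)]).reverse := by
      show (if v = [] then [] else _) = _
      rw [if_neg hvne]
      have htop : v.length - 1 = m := by omega
      have hh : v.reverse.foldl (fun N c => 2 * N + c) 0 = N := by
        rw [horner_eq]
        simp [hN]
      rw [htop, hh, peel_eq]
      simp
    rw [hA, hB]
  · -- ma < 0 : v is empty, both sides return []
    have h0 : ((pvParse s ma).1).length = 0 := by rw [hlen]; omega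
    have hv0 : (pvParse s ma).1 = [] := List.length_eq_zero_iff.mp h0
    show ((PySem.List.pyRange 0 ma 1).foldl pvCarry (pvParse s ma).1).reverse = _
    rw [PySem.List.pyRange_one_eq_nil (by omega)]
    show (pvParse s ma).1.reverse = go_alt s ma
    rw [hv0]
    show ([] : List Int) = (if (pvParse s ma).1 = [] then [] else _)
    rw [if_pos hv0]

-- ===== VERDICT (by name: the statement is the Claim_ definition above) =====
theorem go_spec : Claim_equal_go := by
  intro s ma _ _
  unfold Spec_go
  exact main_eq s ma
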